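-- pv_equiv track=rewrite | github.com/tutetuti/puyopuyo_first6 | output_text/puyo_first_n_and_allclear.py | FindSymmetry
-- ===== SOURCE A (Python) =====
-- a = 'A'
--
-- b = 'B'
--
-- c = 'C'
--
-- d = 'D'
--
-- def FindSymmetry(tsumofu):
--     symmetry = [[a,b,c,d]]
--     for tsumo in tsumofu:
--         sym = []
--         for puyolist in symmetry:
--             sym1 = [puyo for puyo in puyolist if puyo in tsumo]
--             sym2 = list(set(puyolist)-set(sym1))
--             if sym1:
--                 sym.append(sorted(sym1))
--             if sym2:
--                 sym.append(sorted(sym2))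
--         symmetry = sym
--     return symmetry
-- ===== SOURCE B (Python) =====
-- a = 'A'
--
-- b = 'B'
--
-- c = 'C'
--
-- d = 'D'
--
-- def FindSymmetry(tsumofu):
--     colors = [a, b, c, d]
--
--     def sig(col):
--         return tuple(0 if col in tsumo else 1 for tsumo in tsumofu)
--
--     keys = sorted({sig(col) for col in colors})
--     return [[col for col in colors if sig(col) == k] for k in keys]
-- ===== Notes on version B (the rewrite author's own statement) =====
-- stated objective: alternative
-- what changed: Instead of refining the partition tsumo-by-tsumo with repeated splits, sorts and set differences, B computes one integer membership signature per color (bit 0 = in the tsumo, 1 = not, earlier tsumos more significant) and emits the colors grouped by equal signature in ascending signature order.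
import Mathlib
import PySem

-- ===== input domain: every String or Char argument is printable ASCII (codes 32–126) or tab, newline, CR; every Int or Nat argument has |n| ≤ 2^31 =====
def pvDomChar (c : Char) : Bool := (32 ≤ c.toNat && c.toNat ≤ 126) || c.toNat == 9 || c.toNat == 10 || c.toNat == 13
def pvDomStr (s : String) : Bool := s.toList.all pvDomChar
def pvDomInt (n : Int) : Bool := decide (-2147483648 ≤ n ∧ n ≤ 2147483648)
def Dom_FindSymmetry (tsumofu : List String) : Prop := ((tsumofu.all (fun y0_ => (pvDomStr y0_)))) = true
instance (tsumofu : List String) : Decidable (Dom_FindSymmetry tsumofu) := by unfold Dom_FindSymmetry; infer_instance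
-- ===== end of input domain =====

-- B replaces A's tsumo-by-tsumo partition refinement by a one-shot grouping of the four
-- colors by an integer membership signature (objective: alternative decomposition).

-- ===== PORT A =====
def FindSymmetry (tsumofu : List String) : List (List String) :=
  tsumofu.foldl
    (fun symmetry tsumo =>
      symmetry.foldl
        (fun sym puyolist =>
          let sym1 := puyolist.filter (fun puyo => PySem.Str.isIn puyo tsumo)
          let sym2 : List String := PySem.Set.diff (PySem.Set.ofList puyolist) (PySem.Set.ofList sym1)
          let sym := if sym1.isEmpty then sym else sym ++ [PySem.List.sorted sym1 (fun x => x)]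
          if sym2.isEmpty then sym else sym ++ [PySem.List.sorted sym2 (fun x => x)])
        [])
    [["A", "B", "C", "D"]]

-- ===== PORT B =====
def pySig (tsumofu : List String) (col : String) : List Int :=
  tsumofu.map (fun tsumo => if PySem.Str.isIn col tsumo then 0 else 1)

def FindSymmetry_alt (tsumofu : List String) : List (List String) :=
  let colors := ["A", "B", "C", "D"]
  let keys := PySem.List.sorted (PySem.Set.ofList (colors.map (pySig tsumofu))) (fun x => x)
  keys.map (fun k => colors.filter (fun col => pySig tsumofu col == k))

-- ===== PRECONDITION & SPEC =====
def Spec_FindSymmetry (tsumofu : List String) (out : List (List String)) : Prop := out = FindSymmetry_alt tsumofu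
instance (tsumofu : List String) (out : List (List String)) : Decidable (Spec_FindSymmetry tsumofu out) := by unfold Spec_FindSymmetry; infer_instance

-- ===== CLAIM (what is proved, stated in full; the proofs are below) =====
def Claim_equal_FindSymmetry : Prop := ∀ (tsumofu : List String), Dom_FindSymmetry tsumofu → Spec_FindSymmetry tsumofu (FindSymmetry tsumofu)

-- ===== LEMMAS AND PROOFS =====

-- A's inner loop over the current partition, as a named function (identical body to FindSymmetry's).
def pvStep (tsumo : String) (symmetry : List (List String)) : List (List String) :=
  symmetry.foldl
    (fun sym puyolist =>
      let sym1 := puyolist.filter (fun puyo => PySem.Str.isIn puyo tsumo)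
      let sym2 : List String := PySem.Set.diff (PySem.Set.ofList puyolist) (PySem.Set.ofList sym1)
      let sym := if sym1.isEmpty then sym else sym ++ [PySem.List.sorted sym1 (fun x => x)]
      if sym2.isEmpty then sym else sym ++ [PySem.List.sorted sym2 (fun x => x)])
    []

-- what pvStep contributes for one group
def pvEmit (tsumo : String) (g : List String) : List (List String) :=
  let sym1 := g.filter (fun puyo => PySem.Str.isIn puyo tsumo)
  let sym2 : List String := PySem.Set.diff (PySem.Set.ofList g) (PySem.Set.ofList sym1)
  (if sym1.isEmpty then [] else [PySem.List.sorted sym1 (fun x => x)]) ++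
  (if sym2.isEmpty then [] else [PySem.List.sorted sym2 (fun x => x)])

-- A's whole loop started from a single group
def pvF (g : List String) (ts : List String) : List (List String) :=
  ts.foldl (fun symmetry tsumo => pvStep tsumo symmetry) [g]

-- B's computation generalized to an arbitrary color group
def pvCore (ts : List String) (g : List String) : List (List String) :=
  (PySem.List.sorted (PySem.Set.ofList (g.map (pySig ts))) (fun x => x)).map
    (fun k => g.filter (fun col => pySig ts col == k))

lemma FindSymmetry_eq_pvF (ts : List String) :
    FindSymmetry ts = pvF ["A", "B", "C", "D"] ts := rfl

lemma alt_eq_pvCore (ts : List String) :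
    FindSymmetry_alt ts = pvCore ts ["A", "B", "C", "D"] := rfl

lemma pvStep_eq_flatMap (t : String) (P : List (List String)) :
    pvStep t P = P.flatMap (pvEmit t) := by
  unfold pvStep
  have h : (fun (sym : List (List String)) (puyolist : List String) =>
      let sym1 := puyolist.filter (fun puyo => PySem.Str.isIn puyo t)
      let sym2 : List String := PySem.Set.diff (PySem.Set.ofList puyolist) (PySem.Set.ofList sym1)
      let sym := if sym1.isEmpty then sym else sym ++ [PySem.List.sorted sym1 (fun x => x)]
      if sym2.isEmpty then sym else sym ++ [PySem.List.sorted sym2 (fun x => x)]) =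
      (fun sym g => sym ++ pvEmit t g) := by
    funext sym g
    simp only [pvEmit]
    split_ifs <;> simp
  rw [h, PySem.List.foldl_append_eq_flatMap]
  simp

lemma pvF_nil (g : List String) : pvF g [] = [g] := rfl

lemma pvFoldl_flatMap (ts : List String) (P : List (List String)) :
    ts.foldl (fun s t => pvStep t s) P = P.flatMap (fun g => pvF g ts) := by
  induction ts generalizing P with
  | nil => simp [pvF]
  | cons t ts ih =>
    rw [List.foldl_cons, ih, pvStep_eq_flatMap, List.flatMap_assoc]
    congr 1
    funext g
    show (pvEmit t g).flatMap (fun h => pvF h ts) = pvF g (t :: ts)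
    rw [pvF, List.foldl_cons, ih, pvStep_eq_flatMap]
    simp

lemma pvF_cons (g : List String) (t : String) (ts : List String) :
    pvF g (t :: ts) = (pvEmit t g).flatMap (fun h => pvF h ts) := by
  rw [pvF, List.foldl_cons, pvFoldl_flatMap, pvStep_eq_flatMap]
  simp

def pvBit (c t : String) : Int := if PySem.Str.isIn c t then 0 else 1

lemma pySig_nil (c : String) : pySig [] c = [] := rfl

lemma pySig_cons (t : String) (ts : List String) (c : String) :
    pySig (t :: ts) c = pvBit c t :: pySig ts c := rfl

lemma pvSortedLex (xs : List (List Int)) :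
    PySem.List.sorted xs (fun x => x) =
      @PySem.List.sorted (List Int) (List Int)
        (@Preorder.toLT _ (@PartialOrder.toPreorder _ (@LinearOrder.toPartialOrder _ List.instLinearOrder)))
        (@LinearOrder.toDecidableLT _ List.instLinearOrder) xs (fun x => x) false := by
  have h : (fun (a b : List Int) => a.decidableLT b) =
      @LinearOrder.toDecidableLT _ List.instLinearOrder := by
    funext a b
    exact Subsingleton.elim _ _
  show @PySem.List.sorted (List Int) (List Int) List.instLT (fun a b => a.decidableLT b)
      xs (fun x => x) false =
    @PySem.List.sorted (List Int) (List Int) List.instLT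
      (@LinearOrder.toDecidableLT _ List.instLinearOrder) xs (fun x => x) false
  rw [h]

lemma pvCore_cons (t : String) (ts : List String) (g : List String) :
    pvCore (t :: ts) g =
      pvCore ts (g.filter (fun c => PySem.Str.isIn c t)) ++
      pvCore ts (g.filter (fun c => !PySem.Str.isIn c t)) := by
  set s1 := g.filter (fun c => PySem.Str.isIn c t) with hs1def
  set s2 := g.filter (fun c => !PySem.Str.isIn c t) with hs2def
  set K1 := PySem.List.sorted (PySem.Set.ofList (s1.map (pySig ts))) (fun x => x) with hK1
  set K2 := PySem.List.sorted (PySem.Set.ofList (s2.map (pySig ts))) (fun x => x) with hK2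
  have hsig0 : ∀ c : String, PySem.Str.isIn c t = true →
      pySig (t :: ts) c = (0:Int) :: pySig ts c := by
    intro c hc
    rw [pySig_cons]
    unfold pvBit
    rw [if_pos hc]
  have hsig1 : ∀ c : String, PySem.Str.isIn c t = false →
      pySig (t :: ts) c = (1:Int) :: pySig ts c := by
    intro c hc
    rw [pySig_cons]
    unfold pvBit
    rw [if_neg (by rw [hc]; simp)]
  have hmemK1 : ∀ x : List Int, x ∈ K1 ↔ ∃ c, c ∈ s1 ∧ pySig ts c = x := by
    intro x
    rw [hK1, PySem.List.mem_sorted, PySem.Set.mem_ofList, List.mem_map]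
  have hmemK2 : ∀ x : List Int, x ∈ K2 ↔ ∃ c, c ∈ s2 ∧ pySig ts c = x := by
    intro x
    rw [hK2, PySem.List.mem_sorted, PySem.Set.mem_ofList, List.mem_map]
  have hndK1 : K1.Nodup := (PySem.List.sorted_perm _ _ _).nodup_iff.mpr (PySem.Set.nodup_ofList _)
  have hndK2 : K2.Nodup := (PySem.List.sorted_perm _ _ _).nodup_iff.mpr (PySem.Set.nodup_ofList _)
  have hkeys : PySem.List.sorted (PySem.Set.ofList (g.map (pySig (t :: ts)))) (fun x => x)
      = K1.map (fun k => (0:Int) :: k) ++ K2.map (fun k => (1:Int) :: k) := by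
    rw [pvSortedLex]
    apply PySem.List.sorted_eq_of_perm_of_pairwise_lt
    · have hnd2 : (K1.map (fun k => (0:Int) :: k) ++ K2.map (fun k => (1:Int) :: k)).Nodup := by
        refine List.Nodup.append
          (hndK1.map (fun a b h => by simpa using h))
          (hndK2.map (fun a b h => by simpa using h)) ?_
        intro x hx1 hx2
        obtain ⟨k, _, rfl⟩ := List.mem_map.mp hx1
        obtain ⟨k', _, h⟩ := List.mem_map.mp hx2
        simp at h
      refine (List.perm_ext_iff_of_nodup hnd2 (PySem.Set.nodup_ofList _)).mpr ?_
      intro x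
      rw [PySem.Set.mem_ofList, List.mem_append, List.mem_map, List.mem_map]
      constructor
      · rintro (⟨k, hk, rfl⟩ | ⟨k, hk, rfl⟩)
        · obtain ⟨c, hc, rfl⟩ := (hmemK1 k).mp hk
          rw [List.mem_map]
          rw [hs1def, List.mem_filter] at hc
          exact ⟨c, hc.1, hsig0 c hc.2⟩
        · obtain ⟨c, hc, rfl⟩ := (hmemK2 k).mp hk
          rw [List.mem_map]
          rw [hs2def, List.mem_filter] at hc
          exact ⟨c, hc.1, hsig1 c (by simpa using hc.2)⟩
      · rintro hx
        obtain ⟨c, hc, rfl⟩ := List.mem_map.mp hx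
        by_cases hm : PySem.Str.isIn c t
        · left
          refine ⟨pySig ts c, (hmemK1 _).mpr ⟨c, ?_, rfl⟩, (hsig0 c hm).symm⟩
          rw [hs1def, List.mem_filter]
          exact ⟨hc, hm⟩
        · right
          refine ⟨pySig ts c, (hmemK2 _).mpr ⟨c, ?_, rfl⟩,
            (hsig1 c (by simpa using hm)).symm⟩
          rw [hs2def, List.mem_filter]
          exact ⟨hc, by simpa using hm⟩
    · have hpwK1 : K1.Pairwise (· < ·) := by
        rw [hK1, pvSortedLex]
        exact PySem.List.sorted_ofList_pairwise_lt _
      have hpwK2 : K2.Pairwise (· < ·) := by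
        rw [hK2, pvSortedLex]
        exact PySem.List.sorted_ofList_pairwise_lt _
      rw [List.pairwise_append]
      refine ⟨?_, ?_, ?_⟩
      · exact List.pairwise_map.mpr (hpwK1.imp
          (fun h => List.cons_lt_cons_iff.mpr (Or.inr ⟨rfl, h⟩)))
      · exact List.pairwise_map.mpr (hpwK2.imp
          (fun h => List.cons_lt_cons_iff.mpr (Or.inr ⟨rfl, h⟩)))
      · intro a ha b hb'
        obtain ⟨k, _, rfl⟩ := List.mem_map.mp ha
        obtain ⟨k', _, rfl⟩ := List.mem_map.mp hb'
        exact List.cons_lt_cons_iff.mpr (Or.inl (by norm_num))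
  show (PySem.List.sorted (PySem.Set.ofList (g.map (pySig (t :: ts)))) (fun x => x)).map
      (fun k => g.filter (fun col => pySig (t :: ts) col == k)) =
    (K1.map (fun k => s1.filter (fun col => pySig ts col == k))) ++
    (K2.map (fun k => s2.filter (fun col => pySig ts col == k)))
  rw [hkeys, List.map_append, List.map_map, List.map_map]
  congr 1
  · apply List.map_congr_left
    intro k _
    show g.filter (fun col => pySig (t :: ts) col == (0:Int) :: k) =
      s1.filter (fun col => pySig ts col == k)
    rw [hs1def, List.filter_filter]
    apply List.filter_congr
    intro c _
    by_cases hm : PySem.Str.isIn c t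
    · rw [hsig0 c hm, hm]
      simp [List.cons_beq_cons]
    · have hmf : PySem.Str.isIn c t = false := by simpa using hm
      rw [hsig1 c hmf, hmf]
      simp [List.cons_beq_cons]
  · apply List.map_congr_left
    intro k _
    show g.filter (fun col => pySig (t :: ts) col == (1:Int) :: k) =
      s2.filter (fun col => pySig ts col == k)
    rw [hs2def, List.filter_filter]
    apply List.filter_congr
    intro c _
    by_cases hm : PySem.Str.isIn c t
    · rw [hsig0 c hm, hm]
      simp [List.cons_beq_cons]
    · have hmf : PySem.Str.isIn c t = false := by simpa using hm
      rw [hsig1 c hmf, hmf]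
      simp [List.cons_beq_cons]

lemma pvOfList_all_nil (l : List (List Int)) (h : ∀ y ∈ l, y = ([] : List Int)) (hne : l ≠ []) :
    PySem.Set.ofList l = [[]] := by
  have key : ∀ (m : List (List Int)), (∀ y ∈ m, y = ([] : List Int)) → m.foldl PySem.Set.add [[]] = [[]] := by
    intro m
    induction m with
    | nil => intro _; rfl
    | cons x xs ih =>
      intro hm
      have hx := hm x (by simp)
      subst hx
      rw [List.foldl_cons, show PySem.Set.add [[]] ([] : List Int) = [[]] from rfl]
      exact ih (fun y hy => hm y (by simp [hy]))
  cases l with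
  | nil => simp at hne
  | cons x xs =>
    have hx := h x (by simp)
    subst hx
    rw [PySem.Set.ofList_eq_foldl, List.foldl_cons,
      show PySem.Set.add [] ([] : List Int) = [[]] from rfl]
    exact key xs (fun y hy => h y (by simp [hy]))

lemma pvEmit_sorted (t : String) (g : List String) (hg : g.Pairwise (· < ·)) :
    pvEmit t g =
      (if (g.filter (fun c => PySem.Str.isIn c t)).isEmpty then []
        else [g.filter (fun c => PySem.Str.isIn c t)]) ++
      (if (g.filter (fun c => !PySem.Str.isIn c t)).isEmpty then []
        else [g.filter (fun c => !PySem.Str.isIn c t)]) := by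
  have hnd : g.Nodup := hg.imp (fun h => ne_of_lt h)
  have hle : g.Pairwise (fun a b : String => a ≤ b) := hg.imp (fun h => le_of_lt h)
  have hs1 : PySem.List.sorted (g.filter (fun c => PySem.Str.isIn c t)) (fun x => x) =
      g.filter (fun c => PySem.Str.isIn c t) :=
    PySem.List.sorted_eq_self_of_pairwise _ _ (hle.filter _)
  have hdiff : PySem.Set.diff (PySem.Set.ofList g)
      (PySem.Set.ofList (g.filter (fun c => PySem.Str.isIn c t))) =
      g.filter (fun c => !PySem.Str.isIn c t) := by
    rw [PySem.Set.ofList_eq_self_of_nodup g hnd,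
      PySem.Set.ofList_eq_self_of_nodup _ (hnd.filter _)]
    show List.filter _ g = _
    apply List.filter_congr
    intro x hx
    simp [List.mem_filter, hx]
  have hs2 : PySem.List.sorted (g.filter (fun c => !PySem.Str.isIn c t)) (fun x => x) =
      g.filter (fun c => !PySem.Str.isIn c t) :=
    PySem.List.sorted_eq_self_of_pairwise _ _ (hle.filter _)
  unfold pvEmit
  simp only [hdiff, hs1, hs2]

lemma pvF_eq_pvCore (ts : List String) (g : List String)
    (hg : g.Pairwise (· < ·)) (hne : g ≠ []) : pvF g ts = pvCore ts g := by
  induction ts generalizing g with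
  | nil =>
    rw [pvF_nil]
    unfold pvCore
    rw [show g.map (pySig []) = g.map (fun _ => ([] : List Int)) from
      List.map_congr_left (fun c _ => rfl)]
    have hz : ∀ y ∈ g.map (fun _ => ([] : List Int)), y = ([] : List Int) := by
      intro y hy
      rw [List.map_const'] at hy
      exact List.eq_of_mem_replicate hy
    rw [pvOfList_all_nil _ hz (by simpa using hne)]
    rw [show PySem.List.sorted ([[]] : List (List Int)) (fun x => x) = [[]] from rfl]
    simp [pySig_nil]
  | cons t ts ih =>
    rw [pvF_cons, pvEmit_sorted t g hg, pvCore_cons]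
    have hs1 : (g.filter (fun c => PySem.Str.isIn c t)).Pairwise (· < ·) := hg.filter _
    have hs2 : (g.filter (fun c => !PySem.Str.isIn c t)).Pairwise (· < ·) := hg.filter _
    rw [List.flatMap_append]
    have e1 : List.flatMap (fun h => pvF h ts)
        (if (g.filter (fun c => PySem.Str.isIn c t)).isEmpty then []
          else [g.filter (fun c => PySem.Str.isIn c t)]) =
        pvCore ts (g.filter (fun c => PySem.Str.isIn c t)) := by
      by_cases h1 : (g.filter (fun c => PySem.Str.isIn c t)) = []
      · rw [h1]; rfl
      · rw [if_neg (by simpa [List.isEmpty_iff] using h1), List.flatMap_cons,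
          List.flatMap_nil, List.append_nil]
        exact ih _ hs1 h1
    have e2 : List.flatMap (fun h => pvF h ts)
        (if (g.filter (fun c => !PySem.Str.isIn c t)).isEmpty then []
          else [g.filter (fun c => !PySem.Str.isIn c t)]) =
        pvCore ts (g.filter (fun c => !PySem.Str.isIn c t)) := by
      by_cases h2 : (g.filter (fun c => !PySem.Str.isIn c t)) = []
      · rw [h2]; rfl
      · rw [if_neg (by simpa [List.isEmpty_iff] using h2), List.flatMap_cons,
          List.flatMap_nil, List.append_nil]
        exact ih _ hs2 h2
    rw [e1, e2]

-- ===== VERDICT (by name: the statement is the Claim_ definition above) =====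
theorem FindSymmetry_spec : Claim_equal_FindSymmetry := by
  intro ts _
  show FindSymmetry ts = FindSymmetry_alt ts
  rw [FindSymmetry_eq_pvF, alt_eq_pvCore]
  refine pvF_eq_pvCore ts _ ?_ (by simp)
  have h : ∀ x y : String, x.toList < y.toList → x < y := fun _ _ => String.lt_iff_toList_lt.mpr
  refine List.Pairwise.cons ?_ (List.Pairwise.cons ?_ (List.Pairwise.cons ?_ (List.pairwise_singleton _ _)))
  all_goals intro b hb; fin_cases hb <;> exact h _ _ (by decide)
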